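-- pv_equiv track=rewrite | github.com/jcraig949jfi/Prometheus | noesis/v2/depth4_bridge_verification.py | generate_depth4_chains
-- ===== SOURCE A (Python) =====
-- import itertools
--
-- def generate_depth4_chains(operators, n=10):
--     """Generate up to n four-operator chains from available operators.
--
--     Uses combinations with replacement (order matters for chains,
--     but we sample representative chains).
--     """
--     if len(operators) < 2:
--         # Not enough operators for diverse chains
--         return [tuple([operators[0]] * 4)] if operators else []
--
--     # Generate all 4-permutations with repetition from the operator set
--     all_chains = list(itertools.product(operators, repeat=4))
--
--     if len(all_chains) <= n:
--         return all_chains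
--
--     # Sample evenly across the space
--     step = len(all_chains) // n
--     sampled = [all_chains[i * step] for i in range(n)]
--     return sampled
-- ===== SOURCE B (Python) =====
-- def _decode(operators, m, k):
--     d0 = k % m
--     k //= m
--     d1 = k % m
--     k //= m
--     d2 = k % m
--     d3 = k // m
--     return (operators[d3], operators[d2], operators[d1], operators[d0])
--
--
-- def generate_depth4_chains(operators, n=10):
--     m = len(operators)
--     if m == 0:
--         return []
--     if m == 1:
--         return [(operators[0],) * 4]
--     total = m ** 4
--     if total <= n:
--         return [_decode(operators, m, k) for k in range(total)]
--     step = total // n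
--     return [_decode(operators, m, i * step) for i in range(n)]
-- ===== Notes on version B (the rewrite author's own statement) =====
-- stated objective: faster
-- what changed: B never materialises the m^4-element Cartesian product: it computes total=m**4 arithmetically and decodes each needed index (i*step, or every index when total<=n) into four base-m digits, indexing operators directly.
import Mathlib
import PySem

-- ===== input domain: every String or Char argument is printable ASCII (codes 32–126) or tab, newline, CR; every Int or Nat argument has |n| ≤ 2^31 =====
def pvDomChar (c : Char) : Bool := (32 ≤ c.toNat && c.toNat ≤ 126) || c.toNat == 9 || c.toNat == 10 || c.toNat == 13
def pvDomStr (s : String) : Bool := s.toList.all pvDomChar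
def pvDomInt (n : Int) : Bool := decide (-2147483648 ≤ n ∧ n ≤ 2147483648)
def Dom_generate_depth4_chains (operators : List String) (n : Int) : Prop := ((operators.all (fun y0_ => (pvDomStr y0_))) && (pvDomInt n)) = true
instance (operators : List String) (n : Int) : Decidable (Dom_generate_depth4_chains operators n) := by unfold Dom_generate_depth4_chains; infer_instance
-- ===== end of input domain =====

-- B replaces A's materialised m^4-element product by arithmetic index decoding (faster; measured).

-- ===== PORT A =====
def generate_depth4_chains (operators : List String) (n : Int) : List (List String) :=
  if operators.length < 2 then
    match operators with
    | [] => []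
    | o :: _ => [[o, o, o, o]]
  else
    let all := operators.flatMap (fun a =>
      operators.flatMap (fun b =>
        operators.flatMap (fun c =>
          operators.map (fun d => [a, b, c, d]))))
    if (all.length : Int) ≤ n then all
    else
      let step := PySem.Int.floordiv (all.length : Int) n
      (PySem.List.pyRange 0 n 1).map (fun i => PySem.List.pyGetD all (i * step) [])

-- ===== PORT B =====
def pvDecode (operators : List String) (m : Int) (k : Int) : List String :=
  let d0 := PySem.Int.mod k m
  let k1 := PySem.Int.floordiv k m
  let d1 := PySem.Int.mod k1 m
  let k2 := PySem.Int.floordiv k1 m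
  let d2 := PySem.Int.mod k2 m
  let d3 := PySem.Int.floordiv k2 m
  [PySem.List.pyGetD operators d3 "", PySem.List.pyGetD operators d2 "",
   PySem.List.pyGetD operators d1 "", PySem.List.pyGetD operators d0 ""]

def generate_depth4_chains_alt (operators : List String) (n : Int) : List (List String) :=
  let m := operators.length
  if m = 0 then []
  else if m = 1 then
    let o := PySem.List.pyGetD operators 0 ""
    [[o, o, o, o]]
  else
    let total : Int := (m : Int) ^ 4
    if total ≤ n then
      (PySem.List.pyRange 0 total 1).map (fun k => pvDecode operators (m : Int) k)
    else
      let step := PySem.Int.floordiv total n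
      (PySem.List.pyRange 0 n 1).map (fun i => pvDecode operators (m : Int) (i * step))

-- ===== PRECONDITION & SPEC =====
-- Pre_ excludes only n = 0 with ≥ 2 operators, where Python A raises ZeroDivisionError (total // n).
def Pre_generate_depth4_chains (operators : List String) (n : Int) : Prop :=
  operators.length < 2 ∨ n ≠ 0
instance (operators : List String) (n : Int) : Decidable (Pre_generate_depth4_chains operators n) := by
  unfold Pre_generate_depth4_chains; infer_instance

def pvWitness_generate_depth4_chains : List String × Int := (["+", "*"], 3)

def Spec_generate_depth4_chains (operators : List String) (n : Int) (out : List (List String)) : Prop := out = generate_depth4_chains_alt operators n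
instance (operators : List String) (n : Int) (out : List (List String)) : Decidable (Spec_generate_depth4_chains operators n out) := by unfold Spec_generate_depth4_chains; infer_instance

-- ===== CLAIM (what is proved, stated in full; the proofs are below) =====
def Claim_equal_generate_depth4_chains : Prop := ∀ (operators : List String) (n : Int), Dom_generate_depth4_chains operators n → Pre_generate_depth4_chains operators n → Spec_generate_depth4_chains operators n (generate_depth4_chains operators n)

-- ===== LEMMAS AND PROOFS =====

theorem pv_flatMap_length {α β : Type} (xs : List α) (f : α → List β) (c : Nat)
    (h : ∀ a ∈ xs, (f a).length = c) : (xs.flatMap f).length = xs.length * c := by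
  induction xs with
  | nil => simp
  | cons a t ih =>
    simp only [List.flatMap_cons, List.length_append, List.length_cons,
      h a (List.mem_cons_self), ih (fun b hb => h b (List.mem_cons_of_mem _ hb))]
    ring

theorem pv_flatMap_getElem? {α β : Type} (xs : List α) (f : α → List β) (c : Nat)
    (h : ∀ a ∈ xs, (f a).length = c) (k : Nat) (hk : k < xs.length * c) :
    (xs.flatMap f)[k]? = xs[k / c]?.bind (fun a => (f a)[k % c]?) := by
  induction xs generalizing k with
  | nil => simp at hk
  | cons a t ih =>
    have hc : 0 < c := by
      rcases Nat.eq_zero_or_pos c with h0 | h0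
      · simp [h0] at hk
      · exact h0
    have hfa : (f a).length = c := h a List.mem_cons_self
    by_cases hkc : k < c
    · rw [List.flatMap_cons, List.getElem?_append_left (by omega),
        Nat.div_eq_of_lt hkc, Nat.mod_eq_of_lt hkc]
      simp
    · have hck : c ≤ k := by omega
      rw [List.flatMap_cons, List.getElem?_append_right (by omega), hfa]
      have hdiv : k / c = (k - c) / c + 1 := Nat.div_eq_sub_div hc hck
      have hmod : k % c = (k - c) % c := Nat.mod_eq_sub_mod hck
      rw [hdiv, hmod, List.getElem?_cons_succ]
      exact ih (fun b hb => h b (List.mem_cons_of_mem _ hb)) (k - c)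
        (by simp only [List.length_cons, Nat.add_mul, Nat.one_mul] at hk; omega)

-- the decoded chain at flat index k, as plain Nat arithmetic
def pvDecN (operators : List String) (k : Nat) : List String :=
  let m := operators.length
  [operators.getD (k / m ^ 3) "", operators.getD (k / m ^ 2 % m) "",
   operators.getD (k / m % m) "", operators.getD (k % m) ""]

theorem pv_all_getElem? (operators : List String) (k : Nat)
    (hk : k < operators.length ^ 4) :
    (operators.flatMap (fun a =>
      operators.flatMap (fun b =>
        operators.flatMap (fun c =>
          operators.map (fun d => [a, b, c, d])))))[k]? = some (pvDecN operators k) := by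
  set m := operators.length with hm
  have hm0 : 0 < m := by
    rcases Nat.eq_zero_or_pos m with h0 | h0
    · rw [h0] at hk; simp at hk
    · exact h0
  have hlen1 : ∀ a ∈ operators,
      (operators.flatMap (fun b => operators.flatMap (fun c =>
        operators.map (fun d => [a, b, c, d])))).length = m ^ 3 := by
    intro a _
    rw [pv_flatMap_length _ _ (m ^ 2) (fun b _ => by
      rw [pv_flatMap_length _ _ m (fun c _ => by simp [← hm])]; ring)]
    ring
  rw [pv_flatMap_getElem? _ _ (m ^ 3) hlen1 k (by
    calc k < m ^ 4 := hk
    _ = m * m ^ 3 := by ring)]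
  have hka : k / m ^ 3 < m := Nat.div_lt_of_lt_mul (by calc k < m ^ 4 := hk
    _ = m ^ 3 * m := by ring)
  rw [List.getElem?_eq_getElem hka]
  simp only [Option.bind_some]
  set j := k % m ^ 3 with hj
  have hjlt : j < m ^ 3 := Nat.mod_lt _ (by positivity)
  rw [pv_flatMap_getElem? _ _ (m ^ 2) (fun b _ => by
      rw [pv_flatMap_length _ _ m (fun c _ => by simp [← hm])]; ring) j (by
    calc j < m ^ 3 := hjlt
    _ = m * m ^ 2 := by ring)]
  have hjb : j / m ^ 2 < m := Nat.div_lt_of_lt_mul (by calc j < m ^ 3 := hjlt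
    _ = m ^ 2 * m := by ring)
  rw [List.getElem?_eq_getElem hjb]
  simp only [Option.bind_some]
  set j2 := j % m ^ 2 with hj2
  have hj2lt : j2 < m ^ 2 := Nat.mod_lt _ (by positivity)
  rw [pv_flatMap_getElem? _ _ m (fun c _ => by simp [← hm]) j2 (by
    calc j2 < m ^ 2 := hj2lt
    _ = m * m := by ring)]
  have hjc : j2 / m < m := Nat.div_lt_of_lt_mul (by calc j2 < m ^ 2 := hj2lt
    _ = m * m := by ring)
  rw [List.getElem?_eq_getElem hjc]
  simp only [Option.bind_some]
  have hjd : j2 % m < m := Nat.mod_lt _ hm0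
  rw [List.getElem?_map, List.getElem?_eq_getElem hjd]
  -- arithmetic: express the four indices as in pvDecN
  have e1 : j / m ^ 2 = k / m ^ 2 % m := by
    rw [hj, show m ^ 3 = m ^ 2 * m by ring]
    exact Nat.mod_mul_right_div_self k (m ^ 2) m
  have e2 : j2 = k % m ^ 2 := by
    rw [hj2, hj, Nat.mod_mod_of_dvd _ (pow_dvd_pow m (by omega))]
  have e3 : j2 / m = k / m % m := by
    rw [e2, show m ^ 2 = m * m by ring]
    exact Nat.mod_mul_right_div_self k m m
  have e4 : j2 % m = k % m := by
    rw [e2, Nat.mod_mod_of_dvd _ (dvd_pow_self m (by omega))]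
  simp only [pvDecN, ← hm, e1, e3, e4, List.getD]
  refine congrArg some ?_
  refine congrArg₂ _ ?_ (congrArg₂ _ ?_ (congrArg₂ _ ?_ (congrArg₂ _ ?_ rfl)))
  · rw [List.getElem?_eq_getElem hka]; rfl
  · rw [List.getElem?_eq_getElem (Nat.mod_lt _ hm0)]; rfl
  · rw [List.getElem?_eq_getElem (Nat.mod_lt _ hm0)]; rfl
  · rw [List.getElem?_eq_getElem (Nat.mod_lt _ hm0)]; rfl

theorem pv_decode_natCast (operators : List String) (k : Nat) :
    pvDecode operators (operators.length : Int) (k : Nat) = pvDecN operators k := by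
  set m := operators.length with hmdef
  simp only [pvDecode, pvDecN, PySem.Int.mod_natCast, PySem.Int.floordiv_natCast,
    PySem.List.pyGetD_natCast, Nat.div_div_eq_div_mul]
  rw [← hmdef]
  norm_num [pow_succ]

-- length of the materialised product
theorem pv_all_length (operators : List String) :
    (operators.flatMap (fun a =>
      operators.flatMap (fun b =>
        operators.flatMap (fun c =>
          operators.map (fun d => [a, b, c, d]))))).length = operators.length ^ 4 := by
  rw [pv_flatMap_length _ _ (operators.length ^ 3) (fun a _ => by
    rw [pv_flatMap_length _ _ (operators.length ^ 2) (fun b _ => by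
      rw [pv_flatMap_length _ _ operators.length (fun c _ => by simp)]; ring)]; ring)]
  ring

-- ===== VERDICT (by name: the statement is the Claim_ definition above) =====
theorem generate_depth4_chains_spec : Claim_equal_generate_depth4_chains := by
  intro operators n _ hpre
  unfold Spec_generate_depth4_chains generate_depth4_chains generate_depth4_chains_alt
  by_cases hsmall : operators.length < 2
  · -- fewer than two operators: both take the degenerate branch
    rw [if_pos hsmall]
    cases operators with
    | nil => simp
    | cons o t =>
      cases t with
      | nil => simp [PySem.List.pyGetD_zero_cons]
      | cons o2 t2 => simp only [List.length_cons] at hsmall; omega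
  · rw [if_neg hsmall]
    set m := operators.length with hmdef
    have hm2 : 2 ≤ m := by omega
    have hm0 : 0 < m := by omega
    have hn0 : n ≠ 0 := by
      rcases hpre with h | h
      · omega
      · exact h
    simp only [if_neg (by omega : ¬ m = 0), if_neg (by omega : ¬ m = 1)]
    set all := operators.flatMap (fun a =>
      operators.flatMap (fun b =>
        operators.flatMap (fun c =>
          operators.map (fun d => [a, b, c, d])))) with hall
    have hlen : all.length = m ^ 4 := pv_all_length operators
    have hcast : ((all.length : Int)) = (m : Int) ^ 4 := by rw [hlen]; push_cast; ring
    rw [hcast]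
    by_cases hle : (m : Int) ^ 4 ≤ n
    · rw [if_pos hle, if_pos hle]
      -- all = (range total).map decode
      have htot : ((m : Int) ^ 4) = ((m ^ 4 : Nat) : Int) := by push_cast; ring
      rw [htot, PySem.List.pyRange_zero_nat]
      apply List.ext_getElem?
      intro k
      by_cases hk : k < m ^ 4
      · rw [pv_all_getElem? operators k hk]
        simp [hk]
        rw [hmdef]
        exact (pv_decode_natCast operators k).symm
      · rw [List.getElem?_eq_none (by omega : all.length ≤ k),
          List.getElem?_eq_none (by simpa using hk)]
    · rw [if_neg hle, if_neg hle]
      apply List.map_congr_left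
      intro i hi
      rw [PySem.List.mem_pyRange_one] at hi
      obtain ⟨hi0, hin⟩ := hi
      have hnpos : 0 < n := lt_of_le_of_lt hi0 hin
      set step := PySem.Int.floordiv ((m : Int) ^ 4) n with hstep
      have hstep_ed : step = (m : Int) ^ 4 / n := PySem.Int.floordiv_eq_ediv_of_pos hnpos
      have hr := Int.mul_ediv_add_emod ((m : Int) ^ 4) n
      have hrn : 0 ≤ ((m : Int) ^ 4) % n := Int.emod_nonneg _ (ne_of_gt hnpos)
      have hstep_pos : 0 < step := by
        rw [hstep_ed]
        have h1 : 1 ≤ (m : Int) ^ 4 / n := by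
          rw [Int.le_ediv_iff_mul_le hnpos]
          omega
        omega
      have hbound : i * step < ((m : Int) ^ 4) := by
        have h1 : i * step ≤ (n - 1) * step :=
          mul_le_mul_of_nonneg_right (by omega) hstep_pos.le
        have h2 : n * step ≤ (m : Int) ^ 4 := by rw [hstep_ed]; omega
        nlinarith
      have hnn : 0 ≤ i * step := mul_nonneg hi0 hstep_pos.le
      have hKlt : (i * step).toNat < m ^ 4 := by
        have h4 : ((m ^ 4 : Nat) : Int) = (m : Int) ^ 4 := by push_cast; ring
        omega
      have hKcast : (((i * step).toNat : Nat) : Int) = i * step := Int.toNat_of_nonneg hnn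
      rw [PySem.List.pyGetD_eq_getElem all [] hnn (by rw [hlen]; push_cast; omega)]
      have h2 : all[(i * step).toNat]? = some (pvDecode operators (m : Int) ((i * step).toNat : Nat)) := by
        rw [pv_all_getElem? operators _ hKlt, pv_decode_natCast operators _]
      rw [List.getElem?_eq_getElem (by omega : (i * step).toNat < all.length)] at h2
      rw [Option.some.inj h2, hKcast]
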